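-- pv_equiv track=rewrite | github.com/kaywalker91/TimeWalker | tools/data_pipeline/cleanup_missing_references.py | clean_ref_list
-- ===== SOURCE A (Python) =====
-- def dedupe(values):
--     seen = set()
--     out = []
--     for value in values:
--         if value not in seen:
--             out.append(value)
--             seen.add(value)
--     return out
--
-- def clean_ref_list(obj, field, valid_set):
--     values = obj.get(field) or []
--     cleaned = [value for value in values if value in valid_set]
--     cleaned = dedupe(cleaned)
--     removed = len(values) - len(cleaned)
--     if removed:
--         obj[field] = cleaned
--     return removed
-- ===== SOURCE B (Python) =====
-- def clean_ref_list(obj, field, valid_set):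
--     values = obj.get(field) or []
--     valid = set(valid_set)
--     seen = set()
--     cleaned = []
--     removed = 0
--     for value in values:
--         if value in valid and value not in seen:
--             cleaned.append(value)
--             seen.add(value)
--         else:
--             removed += 1
--     if removed:
--         obj[field] = cleaned
--     return removed
-- ===== Notes on version B (the rewrite author's own statement) =====
-- stated objective: simpler
-- what changed: Replaces the filter-comprehension followed by a separate dedupe pass (and the length subtraction) with a single loop that keeps one seen set and counts removed directly; the dedupe helper disappears.
import Mathlib
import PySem

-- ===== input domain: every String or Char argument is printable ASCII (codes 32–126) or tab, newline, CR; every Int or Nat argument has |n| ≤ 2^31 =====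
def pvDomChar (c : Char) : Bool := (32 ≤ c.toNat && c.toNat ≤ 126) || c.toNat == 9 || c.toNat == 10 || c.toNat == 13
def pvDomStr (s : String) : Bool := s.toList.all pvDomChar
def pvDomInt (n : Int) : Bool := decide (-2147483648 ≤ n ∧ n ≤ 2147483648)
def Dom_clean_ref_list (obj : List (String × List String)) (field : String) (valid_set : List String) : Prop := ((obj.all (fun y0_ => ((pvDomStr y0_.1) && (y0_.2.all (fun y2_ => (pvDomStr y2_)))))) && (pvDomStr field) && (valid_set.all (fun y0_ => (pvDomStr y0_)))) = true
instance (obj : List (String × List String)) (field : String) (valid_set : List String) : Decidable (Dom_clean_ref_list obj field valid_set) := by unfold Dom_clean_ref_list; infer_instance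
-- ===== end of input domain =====

-- B fuses A's filter comprehension and separate dedupe pass into one loop that counts
-- removed entries directly (objective: simpler). Both Pythons mutate obj[field] identically
-- when removed is nonzero; the equivalence proved here is about the RETURN value.

-- ===== PORT A =====
-- A's dedupe helper: loop over values keeping a seen set and an out list
def pvDedupe (seen : PySem.Set String) : List String → List String
  | [] => []
  | v :: rest =>
      if PySem.Set.contains seen v then pvDedupe seen rest
      else v :: pvDedupe (PySem.Set.add seen v) rest

def clean_ref_list (obj : List (String × List String)) (field : String) (valid_set : List String) : Int :=
  let values := (obj.lookup field).getD []      -- obj.get(field) or [] (none → [], and [] or [] = [])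
  let cleaned := values.filter (fun v => valid_set.contains v)
  let cleaned := pvDedupe PySem.Set.empty cleaned
  (values.length : Int) - (cleaned.length : Int)

-- ===== PORT B =====
-- B's single loop: seen set + removed counter (the cleaned list only feeds the mutation,
-- which the return-value port does not model)
def pvCleanLoop (valid : PySem.Set String) (seen : PySem.Set String) (removed : Int) : List String → Int
  | [] => removed
  | v :: rest =>
      if PySem.Set.contains valid v && !(PySem.Set.contains seen v) then
        pvCleanLoop valid (PySem.Set.add seen v) removed rest
      else
        pvCleanLoop valid seen (removed + 1) rest

def clean_ref_list_alt (obj : List (String × List String)) (field : String) (valid_set : List String) : Int :=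
  let values := (obj.lookup field).getD []
  pvCleanLoop (PySem.Set.ofList valid_set) PySem.Set.empty 0 values

-- ===== PRECONDITION & SPEC =====
def Spec_clean_ref_list (obj : List (String × List String)) (field : String) (valid_set : List String) (out : Int) : Prop := out = clean_ref_list_alt obj field valid_set
instance (obj : List (String × List String)) (field : String) (valid_set : List String) (out : Int) : Decidable (Spec_clean_ref_list obj field valid_set out) := by unfold Spec_clean_ref_list; infer_instance

-- ===== CLAIM (what is proved, stated in full; the proofs are below) =====
def Claim_equal_clean_ref_list : Prop := ∀ (obj : List (String × List String)) (field : String) (valid_set : List String), Dom_clean_ref_list obj field valid_set → Spec_clean_ref_list obj field valid_set (clean_ref_list obj field valid_set)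

-- ===== LEMMAS AND PROOFS =====
theorem pv_contains_ofList (xs : List String) (v : String) :
    PySem.Set.contains (PySem.Set.ofList xs) v = xs.contains v := by
  rw [Bool.eq_iff_iff]
  simp [PySem.Set.mem_ofList]

-- the loop invariant: B's counter equals length minus the length of A's dedupe-of-filter,
-- for any shared seen set and starting counter
theorem pv_loop_eq (valid_set : List String) (l : List String) :
    ∀ (seen : PySem.Set String) (removed : Int),
      pvCleanLoop (PySem.Set.ofList valid_set) seen removed l =
        removed + (l.length : Int) -
          ((pvDedupe seen (l.filter (fun v => valid_set.contains v))).length : Int) := by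
  induction l with
  | nil => intro seen removed; simp [pvCleanLoop, pvDedupe]
  | cons v rest ih =>
      intro seen removed
      simp only [pvCleanLoop, pv_contains_ofList, List.filter_cons]
      by_cases hv : v ∈ valid_set <;> by_cases hs : v ∈ seen <;>
        simp [hv, hs, PySem.Set.contains_iff, pvDedupe, ih] <;> omega

-- ===== VERDICT (by name: the statement is the Claim_ definition above) =====
theorem clean_ref_list_spec : Claim_equal_clean_ref_list := by
  intro obj field valid_set _
  unfold Spec_clean_ref_list
  simp only [clean_ref_list, clean_ref_list_alt]
  rw [pv_loop_eq]
  omega
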